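-- pv_equiv track=rewrite | github.com/CarlJorgensen/modulation | Modulation.py | hamming_encode
-- ===== SOURCE A (Python) =====
-- def hamming_encode(data):
--     if len(data) % 4 != 0:
--         raise ValueError("Input data length should be multiple of 4.")
--
--     G = [[1, 0, 0, 1, 0, 1, 1],
--          [0, 1, 0, 1, 0, 1, 0],
--          [0, 0, 1, 1, 0, 0, 1],
--          [0, 0, 0, 0, 1, 1, 1]]
--
--     encode_data = []
--     for k in range(0, len(data), 4):
--         block = data[k:k+4]
--         for i in range(7):
--             sum = 0
--             for j in range(4):
--                 sum += block[j] * G[j][i]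
--             encode_data.append(sum % 2)
--
--     return encode_data
-- ===== SOURCE B (Python) =====
-- def hamming_encode(data):
--     if len(data) % 4 != 0:
--         raise ValueError("Input data length should be multiple of 4.")
--
--     encode_data = []
--     for k in range(0, len(data), 4):
--         b0, b1, b2, b3 = data[k:k+4]
--         encode_data.extend((b0 % 2, b1 % 2, b2 % 2,
--                             (b0 + b1 + b2) % 2, b3 % 2,
--                             (b0 + b1 + b3) % 2, (b0 + b2 + b3) % 2))
--     return encode_data
-- ===== Notes on version B (the rewrite author's own statement) =====
-- stated objective: simpler
-- what changed: Replaces the generator matrix and the nested i/j loops with the seven closed-form parity equations of Hamming(7,4), computed directly from each 4-element block.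
import Mathlib
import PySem

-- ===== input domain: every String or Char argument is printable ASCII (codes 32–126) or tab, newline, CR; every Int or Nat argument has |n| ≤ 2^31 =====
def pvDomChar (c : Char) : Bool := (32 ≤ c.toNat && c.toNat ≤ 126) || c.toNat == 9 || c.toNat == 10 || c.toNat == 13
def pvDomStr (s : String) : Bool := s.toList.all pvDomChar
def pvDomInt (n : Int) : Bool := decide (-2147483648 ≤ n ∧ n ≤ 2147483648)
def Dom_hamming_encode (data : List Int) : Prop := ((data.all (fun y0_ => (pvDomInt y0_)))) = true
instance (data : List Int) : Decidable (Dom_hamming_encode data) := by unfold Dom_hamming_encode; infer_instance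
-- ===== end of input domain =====

-- B replaces A's generator matrix and nested i/j loops by the seven closed-form
-- Hamming(7,4) parity equations per 4-element block (objective: simpler).


-- ===== PORT A =====
-- the generator matrix G of A
def pvG : List (List Int) :=
  [[1, 0, 0, 1, 0, 1, 1],
   [0, 1, 0, 1, 0, 1, 0],
   [0, 0, 1, 1, 0, 0, 1],
   [0, 0, 0, 0, 1, 1, 1]]

def hamming_encode (data : List Int) : List Int :=
  (PySem.List.pyRange 0 data.length 4).foldl (fun encode_data k =>
    let block := PySem.List.slice data (some k) (some (k + 4))
    (PySem.List.pyRange 0 7 1).foldl (fun ed i =>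
      let s := (PySem.List.pyRange 0 4 1).foldl (fun s j =>
        s + ((PySem.List.pyGet? block j).getD 0) *
            ((PySem.List.pyGet? ((PySem.List.pyGet? pvG j).getD []) i).getD 0)) 0
      ed ++ [PySem.Int.mod s 2]) encode_data) []

-- ===== PORT B =====
def hamming_encode_alt : List Int → List Int
  | b0 :: b1 :: b2 :: b3 :: rest =>
      PySem.Int.mod b0 2 :: PySem.Int.mod b1 2 :: PySem.Int.mod b2 2 ::
      PySem.Int.mod (b0 + b1 + b2) 2 :: PySem.Int.mod b3 2 ::
      PySem.Int.mod (b0 + b1 + b3) 2 :: PySem.Int.mod (b0 + b2 + b3) 2 ::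
      hamming_encode_alt rest
  | _ => []

-- ===== PRECONDITION & SPEC =====
-- A raises ValueError when len(data) is not a multiple of 4; exactly those inputs are excluded.
def Pre_hamming_encode (data : List Int) : Prop := data.length % 4 = 0
instance (data : List Int) : Decidable (Pre_hamming_encode data) := by unfold Pre_hamming_encode; infer_instance
def pvWitness_hamming_encode : List Int := [1, 0, 1, 1]

def Spec_hamming_encode (data : List Int) (out : List Int) : Prop := out = hamming_encode_alt data
instance (data : List Int) (out : List Int) : Decidable (Spec_hamming_encode data out) := by unfold Spec_hamming_encode; infer_instance

-- ===== CLAIM (what is proved, stated in full; the proofs are below) =====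
def Claim_equal_hamming_encode : Prop := ∀ (data : List Int), Dom_hamming_encode data → Pre_hamming_encode data → Spec_hamming_encode data (hamming_encode data)

-- ===== LEMMAS AND PROOFS =====

-- the 7-bit chunk A produces for the block starting at index k
def pvChunk (data : List Int) (k : Int) : List Int :=
  (PySem.List.pyRange 0 7 1).map (fun i =>
    PySem.Int.mod
      ((PySem.List.pyRange 0 4 1).foldl (fun s j =>
        s + ((PySem.List.pyGet? (PySem.List.slice data (some k) (some (k + 4))) j).getD 0) *
            ((PySem.List.pyGet? ((PySem.List.pyGet? pvG j).getD []) i).getD 0)) 0) 2)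

lemma hamming_encode_eq_flatMap (data : List Int) :
    hamming_encode data = (PySem.List.pyRange 0 data.length 4).flatMap (pvChunk data) := by
  unfold hamming_encode
  have h : (fun (encode_data : List Int) (k : Int) =>
      (PySem.List.pyRange 0 7 1).foldl (fun ed i =>
        ed ++ [PySem.Int.mod
          ((PySem.List.pyRange 0 4 1).foldl (fun s j =>
            s + ((PySem.List.pyGet? (PySem.List.slice data (some k) (some (k + 4))) j).getD 0) *
                ((PySem.List.pyGet? ((PySem.List.pyGet? pvG j).getD []) i).getD 0)) 0) 2]) encode_data)
      = fun encode_data k => encode_data ++ pvChunk data k := by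
    funext acc k
    exact PySem.List.foldl_append_singleton_eq_map _ _ acc
  rw [h, PySem.List.foldl_append_eq_flatMap]
  rfl

lemma pvChunk_zero (b0 b1 b2 b3 : Int) (rest : List Int) :
    pvChunk (b0 :: b1 :: b2 :: b3 :: rest) 0 =
      [PySem.Int.mod b0 2, PySem.Int.mod b1 2, PySem.Int.mod b2 2,
       PySem.Int.mod (b0 + b1 + b2) 2, PySem.Int.mod b3 2,
       PySem.Int.mod (b0 + b1 + b3) 2, PySem.Int.mod (b0 + b2 + b3) 2] := by
  have hs : PySem.List.slice (b0 :: b1 :: b2 :: b3 :: rest) (some 0) (some 4) = [b0, b1, b2, b3] := by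
    have := PySem.List.slice_natCast (b0 :: b1 :: b2 :: b3 :: rest) 0 4
    simpa using this
  simp only [pvChunk, show (0:Int) + 4 = 4 from by norm_num, hs,
    show PySem.List.pyRange 0 7 1 = [0,1,2,3,4,5,6] from rfl,
    show PySem.List.pyRange 0 4 1 = [0,1,2,3] from rfl,
    List.map, List.foldl, PySem.List.pyGet?, PySem.List.pyIdx?, pvG]
  norm_num [show Int.toNat 2 = 2 from rfl, show Int.toNat 3 = 3 from rfl, show Int.toNat 1 = 1 from rfl, show Int.toNat 0 = 0 from rfl, show Int.toNat 4 = 4 from rfl, show Int.toNat 5 = 5 from rfl, show Int.toNat 6 = 6 from rfl]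

lemma pvChunk_shift (x : Int) (l : List Int) (k : Int) (hk : 0 ≤ k) :
    pvChunk (x :: l) (k + 1) = pvChunk l k := by
  have hs : PySem.List.slice (x :: l) (some (k + 1)) (some (k + 1 + 4)) =
      PySem.List.slice l (some k) (some (k + 4)) := by
    obtain ⟨a, rfl⟩ := Int.eq_ofNat_of_zero_le hk
    have h1 := PySem.List.slice_natCast (x :: l) (a + 1) (a + 5)
    have h2 := PySem.List.slice_natCast l a (a + 4)
    have e1 : ((a : Int) + 1) = ((a + 1 : Nat) : Int) := by push_cast; ring
    have e2 : ((a : Int) + 1 + 4) = ((a + 5 : Nat) : Int) := by push_cast; ring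
    have e3 : ((a : Int) + 4) = ((a + 4 : Nat) : Int) := by push_cast; ring
    rw [e2, e1, h1, e3, h2]
    simp only [List.drop_succ_cons]
    congr 1
    omega
  simp only [pvChunk, hs]

lemma pvChunk_shift4 (b0 b1 b2 b3 : Int) (rest : List Int) (k : Int) (hk : 0 ≤ k) :
    pvChunk (b0 :: b1 :: b2 :: b3 :: rest) (k + 4) = pvChunk rest k := by
  have e : k + 4 = k + 1 + 1 + 1 + 1 := by ring
  rw [e, pvChunk_shift _ _ _ (by omega), pvChunk_shift _ _ _ (by omega),
      pvChunk_shift _ _ _ (by omega), pvChunk_shift _ _ _ hk]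

lemma hamming_encode_step (b0 b1 b2 b3 : Int) (rest : List Int) :
    hamming_encode (b0 :: b1 :: b2 :: b3 :: rest) =
      [PySem.Int.mod b0 2, PySem.Int.mod b1 2, PySem.Int.mod b2 2,
       PySem.Int.mod (b0 + b1 + b2) 2, PySem.Int.mod b3 2,
       PySem.Int.mod (b0 + b1 + b3) 2, PySem.Int.mod (b0 + b2 + b3) 2] ++
      hamming_encode rest := by
  rw [hamming_encode_eq_flatMap, hamming_encode_eq_flatMap]
  have h4 : (0 : Int) < 4 := by norm_num
  rw [PySem.List.pyRange_of_pos _ _ h4, PySem.List.pyRange_of_pos _ _ h4]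
  have hlen : ((b0 :: b1 :: b2 :: b3 :: rest).length : Int) = (rest.length : Int) + 4 := by
    simp; ring
  rw [hlen]
  set n : Int := (rest.length : Int) with hn
  have hn0 : 0 ≤ n := by simp [hn]
  have hcount : (if (0:Int) < n + 4 then ((n + 4 - 0 + 4 - 1) / 4).toNat else 0)
      = (if (0:Int) < n then ((n - 0 + 4 - 1) / 4).toNat else 0) + 1 := by
    split_ifs <;> omega
  rw [hcount, List.range_succ_eq_map, List.map_cons, List.flatMap_cons]
  have hhead : pvChunk (b0 :: b1 :: b2 :: b3 :: rest) (0 + 4 * ((0 : Nat) : Int)) =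
      [PySem.Int.mod b0 2, PySem.Int.mod b1 2, PySem.Int.mod b2 2,
       PySem.Int.mod (b0 + b1 + b2) 2, PySem.Int.mod b3 2,
       PySem.Int.mod (b0 + b1 + b3) 2, PySem.Int.mod (b0 + b2 + b3) 2] := by
    norm_num [pvChunk_zero]
  rw [hhead]
  congr 1
  rw [List.map_map, List.flatMap_map, List.flatMap_map]
  apply List.flatMap_congr
  intro k _
  have : (0 : Int) + 4 * ((Nat.succ k : Nat) : Int) = (0 + 4 * (k : Int)) + 4 := by
    push_cast; ring
  rw [Function.comp_apply, this,
      pvChunk_shift4 _ _ _ _ _ _ (by positivity)]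

lemma main_eq (data : List Int) (hpre : data.length % 4 = 0) :
    hamming_encode data = hamming_encode_alt data := by
  induction data using hamming_encode_alt.induct with
  | case1 b0 b1 b2 b3 rest ih =>
      rw [hamming_encode_step, hamming_encode_alt,
          ih (by simp at hpre ⊢; omega)]
      rfl
  | case2 data h =>
      match data, h with
      | [], _ => rfl
      | [a], _ => simp at hpre
      | [a, b], _ => simp at hpre
      | [a, b, c], _ => simp at hpre
      | a :: b :: c :: d :: r, h => exact (h a b c d r rfl).elim

-- ===== VERDICT (by name: the statement is the Claim_ definition above) =====
theorem hamming_encode_spec : Claim_equal_hamming_encode := by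
  intro data _ hpre
  exact main_eq data hpre
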